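-- pv_equiv track=rewrite | github.com/HernadiB/YT_Shorts_Generator | upload_youtube.py | resolve_playlist_ids
-- ===== SOURCE A (Python) =====
-- def normalize_title(title: str):
--     return " ".join(str(title).split()).casefold()
--
-- def resolve_playlist_ids(titles, state):
--     playlists = state.get("playlists", {})
--     normalized_ids = {
--         normalize_title(title): (title, playlist_id)
--         for title, playlist_id in playlists.items()
--         if str(playlist_id).strip()
--     }
--
--     resolved = []
--     for title in titles:
--         match = normalized_ids.get(normalize_title(title))
--         if match:
--             resolved.append(match)
--
--     return resolved
-- ===== SOURCE B (Python) =====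
-- def normalize_title(title: str):
--     return " ".join(str(title).split()).casefold()
--
-- def resolve_playlist_ids(titles, state):
--     # The most recently added playlist entry wins, so scan the entries
--     # newest-first and stop at the first usable match.
--     entries = list(state.get("playlists", {}).items())
--     resolved = []
--     for title in titles:
--         target = normalize_title(title)
--         for orig_title, playlist_id in reversed(entries):
--             if str(playlist_id).strip() and normalize_title(orig_title) == target:
--                 resolved.append((orig_title, playlist_id))
--                 break
--     return resolved
-- ===== Notes on version B (the rewrite author's own statement) =====
-- stated objective: simpler
-- what changed: Drops the precomputed normalized-title dictionary: each requested title is resolved by a newest-first scan of the playlist entries that stops at the first usable match.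
import Mathlib
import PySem

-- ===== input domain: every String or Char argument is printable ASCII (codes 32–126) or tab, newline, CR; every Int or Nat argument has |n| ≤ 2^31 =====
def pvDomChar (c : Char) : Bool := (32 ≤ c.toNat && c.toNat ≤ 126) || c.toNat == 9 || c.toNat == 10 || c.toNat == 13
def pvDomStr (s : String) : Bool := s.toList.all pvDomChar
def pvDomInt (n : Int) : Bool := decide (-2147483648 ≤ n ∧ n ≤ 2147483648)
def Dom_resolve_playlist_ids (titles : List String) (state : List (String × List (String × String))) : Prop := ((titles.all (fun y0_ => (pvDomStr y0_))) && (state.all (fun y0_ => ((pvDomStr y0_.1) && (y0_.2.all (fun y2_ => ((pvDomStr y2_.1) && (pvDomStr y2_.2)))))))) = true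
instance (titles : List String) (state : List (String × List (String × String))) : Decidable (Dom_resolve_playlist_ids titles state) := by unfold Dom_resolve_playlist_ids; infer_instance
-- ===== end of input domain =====

-- B drops A's precomputed normalized-title dict: each title is resolved by a newest-first scan with early stop (no speed claim).
-- ===== PORT A =====
def pvNormalize (t : String) : String :=
  PySem.Str.lower (PySem.Str.join " " (PySem.Str.split₀ t))

def resolve_playlist_ids (titles : List String) (state : List (String × List (String × String))) : List (String × String) :=
  let playlists := PySem.Dict.getD (PySem.Dict.mk state) "playlists" []
  let normalized_ids :=
    playlists.foldl
      (fun d p =>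
        if PySem.Str.strip p.2 ≠ "" then PySem.Dict.insert d (pvNormalize p.1) p else d)
      PySem.Dict.empty
  titles.foldl
    (fun resolved title =>
      match PySem.Dict.get? normalized_ids (pvNormalize title) with
      | some m => resolved ++ [m]
      | none => resolved)
    []

-- ===== PORT B =====
/-- The inner `for … break` loop of B: first usable match in the given order. -/
def pvFirstMatch (target : String) : List (String × String) → Option (String × String)
  | [] => none
  | p :: rest =>
      if PySem.Str.strip p.2 ≠ "" ∧ pvNormalize p.1 = target then some p
      else pvFirstMatch target rest

def resolve_playlist_ids_alt (titles : List String) (state : List (String × List (String × String))) : List (String × String) :=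
  let entries := PySem.Dict.getD (PySem.Dict.mk state) "playlists" []
  titles.foldl
    (fun resolved title =>
      match pvFirstMatch (pvNormalize title) entries.reverse with
      | some m => resolved ++ [m]
      | none => resolved)
    []

-- ===== PRECONDITION & SPEC =====
def Spec_resolve_playlist_ids (titles : List String) (state : List (String × List (String × String))) (out : List (String × String)) : Prop := out = resolve_playlist_ids_alt titles state
instance (titles : List String) (state : List (String × List (String × String))) (out : List (String × String)) : Decidable (Spec_resolve_playlist_ids titles state out) := by unfold Spec_resolve_playlist_ids; infer_instance

-- ===== CLAIM =====
def Claim_equal_resolve_playlist_ids : Prop := ∀ (titles : List String) (state : List (String × List (String × String))), Dom_resolve_playlist_ids titles state → Spec_resolve_playlist_ids titles state (resolve_playlist_ids titles state)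

-- ===== LEMMAS AND PROOFS =====

lemma pvFirstMatch_append (k : String) (xs ys : List (String × String)) :
    pvFirstMatch k (xs ++ ys)
      = match pvFirstMatch k xs with
        | some q => some q
        | none => pvFirstMatch k ys := by
  induction xs with
  | nil => simp [pvFirstMatch]
  | cons p rest ih =>
    simp only [List.cons_append, pvFirstMatch]
    split_ifs with h
    · rfl
    · exact ih

/-- Looking up `k` in the dict A builds equals B's newest-first first-match scan. -/
lemma pv_dict_rev (pls : List (String × String)) (k : String)
    (d : PySem.Dict String (String × String)) :
    PySem.Dict.get?
      (pls.foldl (fun d p =>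
        if PySem.Str.strip p.2 ≠ "" then PySem.Dict.insert d (pvNormalize p.1) p else d) d) k
    = match pvFirstMatch k pls.reverse with
      | some q => some q
      | none => PySem.Dict.get? d k := by
  induction pls generalizing d with
  | nil => simp [pvFirstMatch]
  | cons p rest ih =>
    simp only [List.foldl_cons, List.reverse_cons, pvFirstMatch_append]
    rw [ih]
    cases hfm : pvFirstMatch k rest.reverse with
    | some q => simp
    | none =>
      simp only [pvFirstMatch]
      by_cases h1 : PySem.Str.strip p.2 = ""
      · rw [if_neg (by simpa using h1), if_neg (by simp [h1])]
      · rw [if_pos h1]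
        by_cases h2 : pvNormalize p.1 = k
        · rw [if_pos ⟨h1, h2⟩, ← h2, PySem.Dict.get?_insert_self]
        · rw [if_neg (fun hc => h2 hc.2), PySem.Dict.get?_insert,
            if_neg (fun hk => h2 hk.symm)]

-- ===== VERDICT =====
theorem resolve_playlist_ids_spec : Claim_equal_resolve_playlist_ids := by
  intro titles state _
  unfold Spec_resolve_playlist_ids resolve_playlist_ids resolve_playlist_ids_alt
  simp only []
  congr 1
  funext resolved title
  rw [pv_dict_rev]
  cases pvFirstMatch (pvNormalize title) _ <;> simp [PySem.Dict.get?_empty]
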